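-- pv_equiv track=rewrite | github.com/pypi-data/pypi-mirror-395 | packages/code-weaver/code_weaver-0.1.0a5.tar.gz/code_weaver-0.1.0a5/src/codeweaver/engine/chunker/delimiter.py | _calculate_nesting_level
-- ===== SOURCE A (Python) =====
-- def _calculate_nesting_level(content: str, pos: int) -> int:
--     """Calculate nesting level at a given position by counting braces.
--
--     Args:
--         content: Source code
--         pos: Position to check nesting at
--
--     Returns:
--         Nesting level (0 = top level, 1+ = nested)
--     """
--     # Count opening and closing braces before this position
--     # Ignore braces in strings and comments
--     brace_depth = 0
--     i = 0
--     in_string = False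
--     string_char = None
--
--     while i < pos:
--         c = content[i]
--
--         # Handle strings
--         if c in ('"', "'", "`") and (i == 0 or content[i - 1] != "\\"):
--             if not in_string:
--                 in_string = True
--                 string_char = c
--             elif c == string_char:
--                 in_string = False
--                 string_char = None
--
--         # Handle comments (simplified - just check for // and /*)
--         elif not in_string:
--             if content[i : i + 2] == "//":
--                 # Skip to end of line
--                 next_newline = content.find("\n", i)
--                 i = next_newline if next_newline >= 0 else len(content)
--                 continue
--             if content[i : i + 2] == "/*":
--                 # Skip to end of comment
--                 end_comment = content.find("*/", i + 2)
--                 i = end_comment + 2 if end_comment >= 0 else len(content)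
--                 continue
--             if c == "{":
--                 brace_depth += 1
--             elif c == "}":
--                 brace_depth = max(0, brace_depth - 1)
--
--         i += 1
--
--     return brace_depth
-- ===== SOURCE B (Python) =====
-- def _calculate_nesting_level(content: str, pos: int) -> int:
--     """Calculate nesting level at a given position by counting braces.
--
--     Uniform char-by-char state machine: explicit in_line_comment /
--     in_block_comment states instead of find()-based skip-ahead.
--     """
--     brace_depth = 0
--     in_string = False
--     string_char = None
--     in_line_comment = False
--     in_block_comment = False
--     i = 0
--     while i < pos:
--         c = content[i]
--         if in_line_comment:
--             if c == "\n":
--                 in_line_comment = False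
--             i += 1
--         elif in_block_comment:
--             if c == "*" and content[i + 1 : i + 2] == "/":
--                 in_block_comment = False
--                 i += 2
--             else:
--                 i += 1
--         elif c in ('"', "'", "`") and (i == 0 or content[i - 1] != "\\"):
--             if not in_string:
--                 in_string = True
--                 string_char = c
--             elif c == string_char:
--                 in_string = False
--                 string_char = None
--             i += 1
--         elif not in_string and content[i : i + 2] == "//":
--             in_line_comment = True
--             i += 2
--         elif not in_string and content[i : i + 2] == "/*":
--             in_block_comment = True
--             i += 2
--         elif not in_string and c == "{":
--             brace_depth += 1
--             i += 1
--         elif not in_string and c == "}":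
--             brace_depth = max(0, brace_depth - 1)
--             i += 1
--         else:
--             i += 1
--     return brace_depth
-- ===== Notes on version B (the rewrite author's own statement) =====
-- stated objective: alternative
-- what changed: Replaced A's find()-based skip-ahead jumps over comments with a uniform char-by-char scan maintaining explicit in_line_comment/in_block_comment state.
import Mathlib
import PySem

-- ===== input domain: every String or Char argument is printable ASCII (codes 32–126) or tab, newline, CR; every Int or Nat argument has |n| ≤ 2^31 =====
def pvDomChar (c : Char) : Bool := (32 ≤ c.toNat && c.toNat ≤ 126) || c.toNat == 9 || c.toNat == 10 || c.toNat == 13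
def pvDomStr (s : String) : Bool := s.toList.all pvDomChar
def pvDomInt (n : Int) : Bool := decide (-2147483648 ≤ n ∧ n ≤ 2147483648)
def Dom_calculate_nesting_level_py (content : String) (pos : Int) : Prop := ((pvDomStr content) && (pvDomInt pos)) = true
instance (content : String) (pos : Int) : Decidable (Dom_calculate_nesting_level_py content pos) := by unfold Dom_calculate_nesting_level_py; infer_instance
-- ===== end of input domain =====

-- B replaces A's find()-based skip-ahead over comments by a uniform char-by-char
-- state machine (explicit line/block-comment states); equal on all pos ≤ len(content).

-- ===== PORT A =====
-- termination measure lemmas cited by name in the ports' decreasing_by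
theorem pv_dec_find {n i : Nat} (h : i < n) : n - (i + 1) < n - i := by omega
theorem pv_dec_step {pos : Int} {i j : Nat} (h : (i : Int) < pos) (hij : i < j) :
    (pos - (j : Int)).toNat < (pos - (i : Int)).toNat := by omega
-- content.find("\n", i): index of the first '\n' at index ≥ i (exact hand port of str.find restricted to this use)
def pvFindNL (cs : List Char) (i : Nat) : Option Nat :=
  if _h : i < cs.length then
    if cs.getD i ' ' = '\n' then some i else pvFindNL cs (i + 1)
  else none
termination_by cs.length - i
decreasing_by exact pv_dec_find _h

-- content.find("*/", i): index of the first j ≥ i with cs[j] = '*', cs[j+1] = '/' (exact hand port of str.find)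
def pvFindSS (cs : List Char) (i : Nat) : Option Nat :=
  if _h : i + 1 < cs.length then
    if cs.getD i ' ' = '*' ∧ cs.getD (i + 1) ' ' = '/' then some i else pvFindSS cs (i + 1)
  else none
termination_by cs.length - i
decreasing_by exact pv_dec_find (Nat.lt_of_succ_lt _h)

theorem pvFindNL_ge (cs : List Char) (i j : Nat) (h : pvFindNL cs i = some j) : i ≤ j := by
  fun_induction pvFindNL cs i with
  | case1 i hlt hc => simp_all
  | case2 i hlt hc ih => have := ih h; omega
  | case3 i hlt => simp_all

theorem pvFindNL_char (cs : List Char) (i j : Nat) (h : pvFindNL cs i = some j) :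
    cs.getD j ' ' = '\n' := by
  fun_induction pvFindNL cs i with
  | case1 i hlt hc => simp_all
  | case2 i hlt hc ih => exact ih h
  | case3 i hlt => simp_all

theorem pvFindSS_ge (cs : List Char) (i j : Nat) (h : pvFindSS cs i = some j) : i ≤ j := by
  fun_induction pvFindSS cs i with
  | case1 i hlt hc => simp_all
  | case2 i hlt hc ih => have := ih h; omega
  | case3 i hlt => simp_all

theorem pv_getD_lt (cs : List Char) (i : Nat) (h : cs.getD i ' ' ≠ ' ') : i < cs.length := by
  by_cases hl : i < cs.length
  · exact hl
  · exact absurd (List.getD_eq_default _ _ (by omega)) h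

-- literal transliteration of A's while loop (content[i] is total here as getD; under
-- Pre_ every access is in range, matching Python, which raises IndexError past the end)
def pvALoop (cs : List Char) (pos : Int) (i : Nat) (depth : Int)
    (inStr : Bool) (strCh : Option Char) : Int :=
  if _h : (i : Int) < pos then
    let c := cs.getD i ' '
    if (c = '"' ∨ c = '\'' ∨ c = '`') ∧ (i = 0 ∨ cs.getD (i - 1) ' ' ≠ '\\') then
      if inStr = false then pvALoop cs pos (i + 1) depth true (some c)
      else if some c = strCh then pvALoop cs pos (i + 1) depth false none
      else pvALoop cs pos (i + 1) depth inStr strCh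
    else if inStr = false then
      if hsl : c = '/' ∧ cs.getD (i + 1) ' ' = '/' then
        -- content[i:i+2] == "//" (a char ≠ ' ' is in range, so the two-char slice is exactly this)
        match hnl : pvFindNL cs i with
        | some j => pvALoop cs pos j depth inStr strCh
        | none => pvALoop cs pos cs.length depth inStr strCh
      else if hbl : c = '/' ∧ cs.getD (i + 1) ' ' = '*' then
        match hss : pvFindSS cs (i + 2) with
        | some j => pvALoop cs pos (j + 2) depth inStr strCh
        | none => pvALoop cs pos cs.length depth inStr strCh
      else if c = '{' then pvALoop cs pos (i + 1) (depth + 1) inStr strCh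
      else if c = '}' then pvALoop cs pos (i + 1) (max 0 (depth - 1)) inStr strCh
      else pvALoop cs pos (i + 1) depth inStr strCh
    else pvALoop cs pos (i + 1) depth inStr strCh
  else depth
termination_by (pos - i).toNat
decreasing_by
  · exact pv_dec_step _h (Nat.lt_succ_self i)
  · exact pv_dec_step _h (Nat.lt_succ_self i)
  · exact pv_dec_step _h (Nat.lt_succ_self i)
  · -- line-comment jump to j = first newline ≥ i: j > i since cs[i] = '/' ≠ '\n'
    have hj := pvFindNL_ge cs i j hnl
    have hc := pvFindNL_char cs i j hnl
    have hc1 : cs.getD i ' ' = '/' := hsl.1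
    have hne : i ≠ j := fun h => absurd ((h ▸ hc1).symm.trans hc) (by decide)
    exact pv_dec_step _h (Nat.lt_of_le_of_ne hj hne)
  · have hc1 : cs.getD i ' ' = '/' := hsl.1
    exact pv_dec_step _h (pv_getD_lt cs i (fun h => absurd (hc1.symm.trans h) (by decide)))
  · have hj := pvFindSS_ge cs (i + 2) j hss
    exact pv_dec_step _h (Nat.lt_of_lt_of_le (Nat.lt_add_of_pos_right (by decide)) (Nat.le_trans hj (Nat.le_add_right j 2)))
  · have hc1 : cs.getD i ' ' = '/' := hbl.1
    exact pv_dec_step _h (pv_getD_lt cs i (fun h => absurd (hc1.symm.trans h) (by decide)))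
  · exact pv_dec_step _h (Nat.lt_succ_self i)
  · exact pv_dec_step _h (Nat.lt_succ_self i)
  · exact pv_dec_step _h (Nat.lt_succ_self i)
  · exact pv_dec_step _h (Nat.lt_succ_self i)

def calculate_nesting_level_py (content : String) (pos : Int) : Int :=
  pvALoop content.toList pos 0 0 false none

-- ===== PORT B =====
-- literal transliteration of B's while loop (uniform single-step state machine)
def pvBLoop (cs : List Char) (pos : Int) (i : Nat) (depth : Int)
    (inStr : Bool) (strCh : Option Char) (inLine inBlock : Bool) : Int :=
  if _h : (i : Int) < pos then
    let c := cs.getD i ' '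
    if inLine then
      if c = '\n' then pvBLoop cs pos (i + 1) depth inStr strCh false inBlock
      else pvBLoop cs pos (i + 1) depth inStr strCh inLine inBlock
    else if inBlock then
      if c = '*' ∧ cs.getD (i + 1) ' ' = '/' then
        -- content[i+1:i+2] == "/" (one-char slice; empty past the end, so exactly this getD test)
        pvBLoop cs pos (i + 2) depth inStr strCh inLine false
      else pvBLoop cs pos (i + 1) depth inStr strCh inLine inBlock
    else if (c = '"' ∨ c = '\'' ∨ c = '`') ∧ (i = 0 ∨ cs.getD (i - 1) ' ' ≠ '\\') then
      if inStr = false then pvBLoop cs pos (i + 1) depth true (some c) inLine inBlock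
      else if some c = strCh then pvBLoop cs pos (i + 1) depth false none inLine inBlock
      else pvBLoop cs pos (i + 1) depth inStr strCh inLine inBlock
    else if inStr = false ∧ c = '/' ∧ cs.getD (i + 1) ' ' = '/' then
      pvBLoop cs pos (i + 2) depth inStr strCh true inBlock
    else if inStr = false ∧ c = '/' ∧ cs.getD (i + 1) ' ' = '*' then
      pvBLoop cs pos (i + 2) depth inStr strCh inLine true
    else if inStr = false ∧ c = '{' then pvBLoop cs pos (i + 1) (depth + 1) inStr strCh inLine inBlock
    else if inStr = false ∧ c = '}' then pvBLoop cs pos (i + 1) (max 0 (depth - 1)) inStr strCh inLine inBlock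
    else pvBLoop cs pos (i + 1) depth inStr strCh inLine inBlock
  else depth
termination_by (pos - i).toNat
decreasing_by
  all_goals first
    | exact pv_dec_step _h (Nat.lt_succ_self i)
    | exact pv_dec_step _h (Nat.lt_add_of_pos_right (by decide))

def calculate_nesting_level_py_alt (content : String) (pos : Int) : Int :=
  pvBLoop content.toList pos 0 0 false none false false

-- ===== PRECONDITION & SPEC =====
-- Pre_ excludes exactly pos > len(content): there Python A (and B) raises IndexError.
def Pre_calculate_nesting_level_py (content : String) (pos : Int) : Prop :=
  pos ≤ (content.toList.length : Int)
instance (content : String) (pos : Int) : Decidable (Pre_calculate_nesting_level_py content pos) := by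
  unfold Pre_calculate_nesting_level_py; infer_instance

def pvWitness_calculate_nesting_level_py : String × Int := ("a{ // }\n{'}'}", 13)

def Spec_calculate_nesting_level_py (content : String) (pos : Int) (out : Int) : Prop :=
  out = calculate_nesting_level_py_alt content pos
instance (content : String) (pos : Int) (out : Int) : Decidable (Spec_calculate_nesting_level_py content pos out) := by
  unfold Spec_calculate_nesting_level_py; infer_instance

-- ===== CLAIM (what is proved, stated in full; the proofs are below) =====
def Claim_equal_calculate_nesting_level_py : Prop := ∀ (content : String) (pos : Int), Dom_calculate_nesting_level_py content pos → Pre_calculate_nesting_level_py content pos → Spec_calculate_nesting_level_py content pos (calculate_nesting_level_py content pos)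

-- ===== LEMMAS AND PROOFS =====

theorem pvFindNL_self (cs : List Char) (i : Nat) (hl : i < cs.length) (hc : cs.getD i ' ' = '\n') :
    pvFindNL cs i = some i := by rw [pvFindNL, dif_pos hl, if_pos hc]

theorem pvFindNL_step (cs : List Char) (i : Nat) (hl : i < cs.length) (hc : cs.getD i ' ' ≠ '\n') :
    pvFindNL cs i = pvFindNL cs (i + 1) := by rw [pvFindNL, dif_pos hl, if_neg hc]

theorem pvFindSS_self (cs : List Char) (i : Nat) (hl : i + 1 < cs.length)
    (h1 : cs.getD i ' ' = '*') (h2 : cs.getD (i + 1) ' ' = '/') :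
    pvFindSS cs i = some i := by rw [pvFindSS, dif_pos hl, if_pos ⟨h1, h2⟩]

theorem pvFindSS_step (cs : List Char) (i : Nat)
    (h : ¬(cs.getD i ' ' = '*' ∧ cs.getD (i + 1) ' ' = '/')) :
    pvFindSS cs i = pvFindSS cs (i + 1) := by
  by_cases hl : i + 1 < cs.length
  · rw [pvFindSS, dif_pos hl, if_neg h]
  · rw [pvFindSS, dif_neg hl, pvFindSS, dif_neg (by omega)]

theorem pvALoop_nl (cs : List Char) (pos : Int) (j : Nat) (depth : Int) (strCh : Option Char)
    (hc : cs.getD j ' ' = '\n') (hj : (j : Int) < pos) :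
    pvALoop cs pos j depth false strCh = pvALoop cs pos (j + 1) depth false strCh := by
  rw [pvALoop, dif_pos hj]
  simp only [hc]
  rw [if_neg (fun h => absurd h.1 (by decide))]
  simp only [if_true]
  rw [dif_neg (fun h => absurd h.1 (by decide))]
  rw [dif_neg (fun h => absurd h.1 (by decide))]
  rw [if_neg (by decide), if_neg (by decide)]
theorem pv_lineRun (cs : List Char) (pos : Int) (hpre : pos ≤ (cs.length : Int)) :
    ∀ (n i : Nat) (depth : Int) (inStr : Bool) (strCh : Option Char), (pos - (i : Int)).toNat ≤ n →
      pvBLoop cs pos i depth inStr strCh true false =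
        (match pvFindNL cs i with
         | some j => if (j : Int) < pos then pvBLoop cs pos (j + 1) depth inStr strCh false false else depth
         | none => depth) := by
  intro n
  induction n with
  | zero =>
    intro i d s sc hn
    have hip : ¬ ((i : Int) < pos) := by omega
    rw [pvBLoop, dif_neg hip]
    cases hfd : pvFindNL cs i with
    | none => rfl
    | some j =>
      have hj := pvFindNL_ge cs i j hfd
      exact (if_neg (show ¬((j:Int) < pos) by omega)).symm
  | succ n ih =>
    intro i d s sc hn
    by_cases hip : (i : Int) < pos
    · have hlen : i < cs.length := by omega
      rw [pvBLoop, dif_pos hip]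
      by_cases hc : cs.getD i ' ' = '\n'
      · simp only [hc, if_true]
        rw [pvFindNL_self cs i hlen hc]
        exact (if_pos hip).symm
      · simp only [if_true, if_neg hc]
        rw [pvFindNL_step cs i hlen hc]
        exact ih (i + 1) d s sc (by omega)
    · have h0 : (0 : Nat) = n + 1 ∨ True := Or.inr trivial
      rw [pvBLoop, dif_neg hip]
      cases hfd : pvFindNL cs i with
      | none => rfl
      | some j =>
        have hj := pvFindNL_ge cs i j hfd
        exact (if_neg (show ¬((j:Int) < pos) by omega)).symm
theorem pv_blockRun (cs : List Char) (pos : Int) (hpre : pos ≤ (cs.length : Int)) :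
    ∀ (n i : Nat) (depth : Int) (inStr : Bool) (strCh : Option Char), (pos - (i : Int)).toNat ≤ n →
      pvBLoop cs pos i depth inStr strCh false true =
        (match pvFindSS cs i with
         | some j => if (j : Int) < pos then pvBLoop cs pos (j + 2) depth inStr strCh false false else depth
         | none => depth) := by
  intro n
  induction n with
  | zero =>
    intro i d s sc hn
    have hip : ¬ ((i : Int) < pos) := by omega
    rw [pvBLoop, dif_neg hip]
    cases hfd : pvFindSS cs i with
    | none => rfl
    | some j =>
      have hj := pvFindSS_ge cs i j hfd
      exact (if_neg (show ¬((j : Int) < pos) by omega)).symm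
  | succ n ih =>
    intro i d s sc hn
    by_cases hip : (i : Int) < pos
    · rw [pvBLoop, dif_pos hip]
      simp only [Bool.false_eq_true, if_false, if_true]
      by_cases hpair : cs.getD i ' ' = '*' ∧ cs.getD (i + 1) ' ' = '/'
      · rw [if_pos hpair]
        have hl1 : i + 1 < cs.length := pv_getD_lt cs (i + 1) (by rw [hpair.2]; decide)
        rw [pvFindSS_self cs i hl1 hpair.1 hpair.2]
        exact (if_pos hip).symm
      · rw [if_neg hpair, pvFindSS_step cs i hpair]
        exact ih (i + 1) d s sc (by omega)
    · rw [pvBLoop, dif_neg hip]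
      cases hfd : pvFindSS cs i with
      | none => rfl
      | some j =>
        have hj := pvFindSS_ge cs i j hfd
        exact (if_neg (show ¬((j : Int) < pos) by omega)).symm
theorem pv_main (cs : List Char) (pos : Int) (hpre : pos ≤ (cs.length : Int)) :
    ∀ (n i : Nat) (depth : Int) (inStr : Bool) (strCh : Option Char), (pos - (i : Int)).toNat ≤ n →
      pvALoop cs pos i depth inStr strCh = pvBLoop cs pos i depth inStr strCh false false := by
  intro n
  induction n with
  | zero =>
    intro i d s sc hn
    have hip : ¬ ((i : Int) < pos) := by omega
    rw [pvALoop, dif_neg hip, pvBLoop, dif_neg hip]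
  | succ n ih =>
    intro i d s sc hn
    by_cases hip : (i : Int) < pos
    · rw [pvALoop, dif_pos hip, pvBLoop, dif_pos hip]
      simp only [Bool.false_eq_true, if_false]
      by_cases hq : (cs.getD i ' ' = '"' ∨ cs.getD i ' ' = '\'' ∨ cs.getD i ' ' = '`') ∧
          (i = 0 ∨ cs.getD (i - 1) ' ' ≠ '\\')
      · rw [if_pos hq, if_pos hq]
        by_cases hs : s = false
        · rw [if_pos hs, if_pos hs]
          exact ih (i + 1) d true (some (cs.getD i ' ')) (by omega)
        · rw [if_neg hs, if_neg hs]
          by_cases hsc : some (cs.getD i ' ') = sc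
          · rw [if_pos hsc, if_pos hsc]
            exact ih (i + 1) d false none (by omega)
          · rw [if_neg hsc, if_neg hsc]
            exact ih (i + 1) d s sc (by omega)
      · rw [if_neg hq, if_neg hq]
        by_cases hs : s = false
        · subst hs
          rw [if_pos rfl]
          by_cases hsl : cs.getD i ' ' = '/' ∧ cs.getD (i + 1) ' ' = '/'
          · rw [dif_pos hsl,
                if_pos (show false = false ∧ cs.getD i ' ' = '/' ∧ cs.getD (i + 1) ' ' = '/' from ⟨rfl, hsl.1, hsl.2⟩)]
            rw [pv_lineRun cs pos hpre n (i + 2) d false sc (by omega)]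
            have hl0 : i < cs.length := pv_getD_lt cs i (by rw [hsl.1]; decide)
            have hl1 : i + 1 < cs.length := pv_getD_lt cs (i + 1) (by rw [hsl.2]; decide)
            have hstep : pvFindNL cs i = pvFindNL cs (i + 2) := by
              rw [pvFindNL_step cs i hl0 (by rw [hsl.1]; decide),
                  pvFindNL_step cs (i + 1) hl1 (by rw [hsl.2]; decide)]
            rw [hstep]
            cases hfd : pvFindNL cs (i + 2) with
            | none =>
              show pvALoop cs pos cs.length d false sc = d
              rw [pvALoop, dif_neg (by omega)]
            | some j =>
              have hj := pvFindNL_ge cs (i + 2) j hfd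
              have hcj := pvFindNL_char cs (i + 2) j hfd
              show pvALoop cs pos j d false sc =
                if (j : Int) < pos then pvBLoop cs pos (j + 1) d false sc false false else d
              by_cases hjp : (j : Int) < pos
              · rw [if_pos hjp, pvALoop_nl cs pos j d sc hcj hjp]
                exact ih (j + 1) d false sc (by omega)
              · rw [if_neg hjp, pvALoop, dif_neg hjp]
          · rw [dif_neg hsl,
                if_neg (show ¬(false = false ∧ cs.getD i ' ' = '/' ∧ cs.getD (i + 1) ' ' = '/') from fun h => hsl ⟨h.2.1, h.2.2⟩)]
            by_cases hbl : cs.getD i ' ' = '/' ∧ cs.getD (i + 1) ' ' = '*'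
            · rw [dif_pos hbl,
                  if_pos (show false = false ∧ cs.getD i ' ' = '/' ∧ cs.getD (i + 1) ' ' = '*' from ⟨rfl, hbl.1, hbl.2⟩)]
              rw [pv_blockRun cs pos hpre n (i + 2) d false sc (by omega)]
              cases hfd : pvFindSS cs (i + 2) with
              | none =>
                show pvALoop cs pos cs.length d false sc = d
                rw [pvALoop, dif_neg (by omega)]
              | some j =>
                have hj := pvFindSS_ge cs (i + 2) j hfd
                show pvALoop cs pos (j + 2) d false sc =
                  if (j : Int) < pos then pvBLoop cs pos (j + 2) d false sc false false else d
                by_cases hjp : (j : Int) < pos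
                · rw [if_pos hjp]
                  exact ih (j + 2) d false sc (by omega)
                · rw [if_neg hjp, pvALoop, dif_neg (by omega)]
            · rw [dif_neg hbl,
                  if_neg (show ¬(false = false ∧ cs.getD i ' ' = '/' ∧ cs.getD (i + 1) ' ' = '*') from fun h => hbl ⟨h.2.1, h.2.2⟩)]
              by_cases hob : cs.getD i ' ' = '{'
              · rw [if_pos hob, if_pos (show false = false ∧ cs.getD i ' ' = '{' from ⟨rfl, hob⟩)]
                exact ih (i + 1) (d + 1) false sc (by omega)
              · rw [if_neg hob, if_neg (show ¬(false = false ∧ cs.getD i ' ' = '{') from fun h => hob h.2)]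
                by_cases hcb : cs.getD i ' ' = '}'
                · rw [if_pos hcb, if_pos (show false = false ∧ cs.getD i ' ' = '}' from ⟨rfl, hcb⟩)]
                  exact ih (i + 1) (max 0 (d - 1)) false sc (by omega)
                · rw [if_neg hcb, if_neg (show ¬(false = false ∧ cs.getD i ' ' = '}') from fun h => hcb h.2)]
                  exact ih (i + 1) d false sc (by omega)
        · rw [if_neg hs]
          rw [if_neg (show ¬(s = false ∧ cs.getD i ' ' = '/' ∧ cs.getD (i + 1) ' ' = '/') from fun h => hs h.1),
              if_neg (show ¬(s = false ∧ cs.getD i ' ' = '/' ∧ cs.getD (i + 1) ' ' = '*') from fun h => hs h.1),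
              if_neg (show ¬(s = false ∧ cs.getD i ' ' = '{') from fun h => hs h.1),
              if_neg (show ¬(s = false ∧ cs.getD i ' ' = '}') from fun h => hs h.1)]
          exact ih (i + 1) d s sc (by omega)
    · rw [pvALoop, dif_neg hip, pvBLoop, dif_neg hip]

theorem calculate_nesting_level_py_witness_ok :
    Dom_calculate_nesting_level_py pvWitness_calculate_nesting_level_py.1 pvWitness_calculate_nesting_level_py.2 ∧
    Pre_calculate_nesting_level_py pvWitness_calculate_nesting_level_py.1 pvWitness_calculate_nesting_level_py.2 := by
  constructor <;> decide

-- ===== VERDICT (by name: the statement is the Claim_ definition above) =====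
theorem calculate_nesting_level_py_spec : Claim_equal_calculate_nesting_level_py := by
  intro content pos _ hpre
  unfold Spec_calculate_nesting_level_py calculate_nesting_level_py calculate_nesting_level_py_alt
  exact pv_main content.toList pos hpre (pos - 0).toNat 0 0 false none le_rfl
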